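-- pv_equiv track=rewrite | github.com/Vlad-Harutyunyan/Python450-advance | week0/Nairi/practicals0/practical2.py | type2
-- ===== SOURCE A (Python) =====
-- def type2(l):
--     first = [char for char in l[0]]
--     cnt = len(l) - 1
--     result = 0
--
--     for elem in range(len(first)):
--         temp = 0
--         for x in range(1,len(l)):
--             if first[elem] in l[x]:
--                 temp += 1
--         if temp == cnt :
--             result += 1
--
--     return result
-- ===== SOURCE B (Python) =====
-- def type2(l):
--     common = set(l[0])
--     for s in l[1:]:
--         common = common.intersection(s)
--     return sum(1 for c in l[0] if c in common)
-- ===== Notes on version B (the rewrite author's own statement) =====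
-- stated objective: alternative
-- what changed: B intersects the character sets of the other strings once and then counts positions of l[0] by a set lookup, instead of A's per-position substring scan of every other string.
import Mathlib
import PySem

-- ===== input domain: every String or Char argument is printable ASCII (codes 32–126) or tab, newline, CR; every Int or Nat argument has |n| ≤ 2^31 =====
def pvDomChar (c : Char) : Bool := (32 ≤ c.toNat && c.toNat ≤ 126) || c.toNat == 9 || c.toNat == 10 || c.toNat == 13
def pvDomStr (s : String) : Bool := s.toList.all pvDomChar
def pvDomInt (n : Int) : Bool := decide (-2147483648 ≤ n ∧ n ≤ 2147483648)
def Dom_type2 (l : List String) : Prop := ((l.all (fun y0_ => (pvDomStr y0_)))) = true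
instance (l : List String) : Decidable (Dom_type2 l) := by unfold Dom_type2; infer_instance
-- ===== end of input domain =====

-- B intersects the character sets of the other strings once, then counts positions of l[0] by a set lookup.

-- ===== PORT A =====
def type2 (l : List String) : Int :=
  let first : List Char := ((PySem.List.pyGet? l 0).getD "").toList
  let cnt : Int := (l.length : Int) - 1
  (List.range first.length).foldl
    (fun result elem =>
      let temp : Int :=
        (PySem.List.pyRange 1 (l.length : Int) 1).foldl
          (fun temp x =>
            if PySem.Chars.isIn [first.getD elem ' '] (PySem.List.pyGetD l x "").toList
            then temp + 1 else temp) 0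
      if temp = cnt then result + 1 else result) 0

-- ===== PORT B =====
def type2_alt (l : List String) : Int :=
  let first : String := (PySem.List.pyGet? l 0).getD ""
  let common : PySem.Set Char :=
    (PySem.List.slice l (some 1) none).foldl
      (fun acc s => PySem.Set.inter acc (PySem.Set.ofList s.toList))
      (PySem.Set.ofList first.toList)
  first.toList.foldl (fun n c => if PySem.Set.contains common c then n + 1 else n) 0

-- ===== PRECONDITION & SPEC =====
-- Pre_ excludes only the empty list, on which A (and B) raise IndexError at l[0].
def Pre_type2 (l : List String) : Prop := l ≠ []
instance (l : List String) : Decidable (Pre_type2 l) := by unfold Pre_type2; infer_instance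
def pvWitness_type2 : List String := ["ab", "ba"]

def Spec_type2 (l : List String) (out : Int) : Prop := out = type2_alt l
instance (l : List String) (out : Int) : Decidable (Spec_type2 l out) := by unfold Spec_type2; infer_instance

-- ===== CLAIM (what is proved, stated in full; the proofs are below) =====
def Claim_equal_type2 : Prop := ∀ (l : List String), Dom_type2 l → Pre_type2 l → Spec_type2 l (type2 l)

-- ===== LEMMAS AND PROOFS =====

-- [c] is an infix of a list iff c is a member
theorem singleton_infix_iff_mem {c : Char} {xs : List Char} : [c] <:+: xs ↔ c ∈ xs := by
  constructor
  · intro h; exact h.sublist.subset (List.mem_singleton_self c)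
  · intro h
    obtain ⟨s, t, rfl⟩ := List.append_of_mem h
    exact ⟨s, t, by simp⟩

theorem isIn_singleton_iff {c : Char} {xs : List Char} :
    PySem.Chars.isIn [c] xs = true ↔ c ∈ xs := by
  rw [PySem.Chars.isIn_iff_infix, singleton_infix_iff_mem]

-- membership in the folded intersection
theorem mem_foldl_inter (t : List String) (s0 : PySem.Set Char) (c : Char) :
    c ∈ t.foldl (fun acc s => PySem.Set.inter acc (PySem.Set.ofList s.toList)) s0 ↔
      c ∈ s0 ∧ ∀ s ∈ t, c ∈ s.toList := by
  induction t generalizing s0 with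
  | nil => simp
  | cons x xs ih =>
    simp only [List.foldl_cons, ih, PySem.Set.mem_inter, PySem.Set.mem_ofList, List.mem_cons]
    constructor
    · rintro ⟨⟨h0, hx⟩, hall⟩
      refine ⟨h0, fun s hs => ?_⟩
      rcases hs with rfl | hs
      · exact hx
      · exact hall s hs
    · rintro ⟨h0, hall⟩
      exact ⟨⟨h0, hall x (Or.inl rfl)⟩, fun s hs => hall s (Or.inr hs)⟩

-- A's inner loop counts the tail strings containing c
theorem inner_temp (h : String) (t : List String) (c : Char) :
    (PySem.List.pyRange 1 ((h :: t).length : Int) 1).foldl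
        (fun temp x =>
          if PySem.Chars.isIn [c] (PySem.List.pyGetD (h :: t) x "").toList
          then temp + 1 else temp) (0 : Int)
      = (t.countP (fun s => PySem.Chars.isIn [c] s.toList) : Int) := by
  rw [PySem.List.foldl_if_add_one]
  have hmap : (PySem.List.pyRange 1 ((h :: t).length : Int) 1).map
      (fun j => PySem.List.pyGetD (h :: t) j "") = (h :: t).drop 1 := by
    have := PySem.List.map_pyGetD_pyRange' (xs := h :: t) (d := "") (a := 1) (by norm_num)
    simpa using this
  have : (PySem.List.pyRange 1 ((h :: t).length : Int) 1).countP
      (fun x => PySem.Chars.isIn [c] (PySem.List.pyGetD (h :: t) x "").toList)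
      = t.countP (fun s => PySem.Chars.isIn [c] s.toList) := by
    have := List.countP_map (p := fun s => PySem.Chars.isIn [c] s.toList)
      (f := fun j => PySem.List.pyGetD (h :: t) j "")
      (l := PySem.List.pyRange 1 ((h :: t).length : Int) 1)
    rw [hmap] at this
    simpa [Function.comp] using this.symm
  rw [this]; ring

-- ===== VERDICT (by name: the statement is the Claim_ definition above) =====
theorem type2_spec : Claim_equal_type2 := by
  intro l _ hpre
  obtain ⟨h, t, rfl⟩ := List.exists_cons_of_ne_nil hpre
  show type2 (h :: t) = type2_alt (h :: t)
  unfold type2 type2_alt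
  have hget : (PySem.List.pyGet? (h :: t) 0).getD "" = h := by
    simp [PySem.List.pyGet?, PySem.List.pyIdx?]
  rw [hget, PySem.List.slice_from_one]
  simp only [List.tail_cons]
  -- A side: replace the inner loop by a count over the tail
  have hbody : (fun (result : Int) (elem : Nat) =>
      let temp : Int :=
        (PySem.List.pyRange 1 (((h :: t).length : Nat) : Int) 1).foldl
          (fun temp x =>
            if PySem.Chars.isIn [h.toList.getD elem ' '] (PySem.List.pyGetD (h :: t) x "").toList
            then temp + 1 else temp) 0
      if temp = ((h :: t).length : Int) - 1 then result + 1 else result)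
      = (fun (result : Int) (elem : Nat) =>
          if (t.countP (fun s => PySem.Chars.isIn [h.toList.getD elem ' '] s.toList) : Int)
              = ((h :: t).length : Int) - 1 then result + 1 else result) := by
    funext result elem
    rw [inner_temp h t (h.toList.getD elem ' ')]
  rw [hbody, PySem.List.foldl_ite_add_one]
  refine Eq.trans ?_ (PySem.List.foldl_if_add_one
      (fun c => PySem.Set.contains
        (t.foldl (fun acc s => PySem.Set.inter acc (PySem.Set.ofList s.toList))
          (PySem.Set.ofList h.toList)) c) h.toList 0).symm
  -- turn the count over indices into a count over the characters
  have hrange : (List.range h.toList.length).map (fun i => h.toList.getD i ' ') = h.toList := by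
    apply List.ext_getElem
    · simp
    · intro i h1 h2
      simp [List.getD_eq_getElem?_getD, List.getElem?_eq_getElem h2]
  have hA : (List.range h.toList.length).countP
      (fun elem => decide ((t.countP (fun s => PySem.Chars.isIn [h.toList.getD elem ' '] s.toList) : Int)
          = ((h :: t).length : Int) - 1))
      = h.toList.countP (fun c => decide ((t.countP (fun s => PySem.Chars.isIn [c] s.toList) : Int)
          = ((h :: t).length : Int) - 1)) := by
    conv_rhs => rw [← hrange]
    rw [List.countP_map]
    rfl
  rw [hA]
  -- pointwise agreement of the two character predicates
  have hcount : h.toList.countP (fun c => decide ((t.countP (fun s => PySem.Chars.isIn [c] s.toList) : Int)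
          = ((h :: t).length : Int) - 1))
      = h.toList.countP (fun c =>
          PySem.Set.contains (t.foldl (fun acc s => PySem.Set.inter acc (PySem.Set.ofList s.toList))
            (PySem.Set.ofList h.toList)) c) := by
    apply List.countP_congr
    intro c hc
    rw [Bool.eq_iff_iff]
    simp only [decide_eq_true_eq, PySem.Set.contains_iff, mem_foldl_inter, PySem.Set.mem_ofList, iff_true]
    have hlen : (((h :: t).length : Int) - 1) = (t.length : Int) := by
      simp only [List.length_cons]; push_cast; ring
    constructor
    · intro hcnt
      have hnat : t.countP (fun s => PySem.Chars.isIn [c] s.toList) = t.length := by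
        have := hcnt.trans hlen
        exact_mod_cast this
      have hall := (List.countP_eq_length).mp hnat
      exact ⟨hc, fun s hs => isIn_singleton_iff.mp (hall s hs)⟩
    · rintro ⟨-, hall⟩
      have hnat := (List.countP_eq_length).mpr (fun s hs => isIn_singleton_iff.mpr (hall s hs))
      rw [hlen]
      exact_mod_cast hnat
  rw [hcount]
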